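-- pv_equiv track=rewrite | github.com/dingodb/dingo-aurora | dingo_command/jobs/cluster_status_syncer.py | determine_cluster_status
-- ===== SOURCE A (Python) =====
-- def determine_cluster_status(node_statuses, instance_statuses, current_status):
--     """
--     根据节点和实例的状态确定集群的状态
--
--     参数:
--     node_statuses (list): 节点状态列表
--     instance_statuses (list): 实例状态列表
--     current_status (str): 当前集群状态
--
--     返回:
--     str: 确定的集群状态
--     """
--     # 如果没有节点或实例，保持当前状态
--     if not node_statuses and not instance_statuses:
--         return current_status
--
--     # 如果有任何失败状态
--     if 'error' in node_statuses or 'error' in instance_statuses or 'failed' in node_statuses or 'failed' in instance_statuses: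
--         return 'error'
--
--     # 如果全部都是运行状态
--     if all(status == 'running' for status in node_statuses) and all(status == 'running' for status in instance_statuses):
--         return 'running'
--
--     # 默认保持当前状态
--     return current_status
-- ===== SOURCE B (Python) =====
-- def determine_cluster_status(node_statuses, instance_statuses, current_status):
--     seen = False
--     has_error = False
--     all_running = True
--     for s in node_statuses + instance_statuses:
--         seen = True
--         if s == 'error' or s == 'failed':
--             has_error = True
--         if s != 'running':
--             all_running = False
--     if not seen:
--         return current_status
--     if has_error:
--         return 'error'
--     if all_running:
--         return 'running'
--     return current_status
-- ===== Notes on version B (the rewrite author's own statement) =====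
-- stated objective: alternative
-- what changed: Replaces A's four separate membership tests and two all() scans with a single pass over the concatenated list maintaining seen/has_error/all_running flags, deciding the result once after the loop.
import Mathlib
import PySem

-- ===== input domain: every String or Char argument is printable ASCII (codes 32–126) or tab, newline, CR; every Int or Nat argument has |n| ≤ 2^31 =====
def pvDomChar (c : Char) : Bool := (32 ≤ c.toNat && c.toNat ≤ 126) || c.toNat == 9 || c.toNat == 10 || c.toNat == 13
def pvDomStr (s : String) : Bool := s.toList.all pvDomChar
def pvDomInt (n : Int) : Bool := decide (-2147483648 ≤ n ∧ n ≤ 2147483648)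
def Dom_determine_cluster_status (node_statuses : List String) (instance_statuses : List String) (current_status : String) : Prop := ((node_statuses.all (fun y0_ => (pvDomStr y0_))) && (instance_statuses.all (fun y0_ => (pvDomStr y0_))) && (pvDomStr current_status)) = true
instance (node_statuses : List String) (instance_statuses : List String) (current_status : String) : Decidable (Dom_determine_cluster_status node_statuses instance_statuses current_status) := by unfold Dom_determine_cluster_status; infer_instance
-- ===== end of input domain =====

-- B replaces A's four membership tests and two all() scans with one pass over the
-- concatenated list maintaining seen/has_error/all_running flags (objective: alternative).

-- ===== PORT A =====
def determine_cluster_status (node_statuses : List String) (instance_statuses : List String) (current_status : String) : String :=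
  if node_statuses = [] ∧ instance_statuses = [] then current_status
  else if node_statuses.contains "error" || instance_statuses.contains "error" ||
          node_statuses.contains "failed" || instance_statuses.contains "failed" then "error"
  else if node_statuses.all (fun status => status == "running") ∧
          instance_statuses.all (fun status => status == "running") then "running"
  else current_status

-- ===== PORT B =====
def determine_cluster_status_alt (node_statuses : List String) (instance_statuses : List String) (current_status : String) : String :=
  let st := (node_statuses ++ instance_statuses).foldl
    (fun (acc : Bool × Bool × Bool) s =>
      (true,
       (if s == "error" || s == "failed" then true else acc.2.1),
       (if s != "running" then false else acc.2.2)))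
    (false, false, true)
  if !st.1 then current_status
  else if st.2.1 then "error"
  else if st.2.2 then "running"
  else current_status

-- ===== PRECONDITION & SPEC =====
def Spec_determine_cluster_status (node_statuses : List String) (instance_statuses : List String) (current_status : String) (out : String) : Prop := out = determine_cluster_status_alt node_statuses instance_statuses current_status
instance (node_statuses : List String) (instance_statuses : List String) (current_status : String) (out : String) : Decidable (Spec_determine_cluster_status node_statuses instance_statuses current_status out) := by unfold Spec_determine_cluster_status; infer_instance

-- ===== CLAIM (what is proved, stated in full; the proofs are below) =====
def Claim_equal_determine_cluster_status : Prop := ∀ (node_statuses : List String) (instance_statuses : List String) (current_status : String), Dom_determine_cluster_status node_statuses instance_statuses current_status → Spec_determine_cluster_status node_statuses instance_statuses current_status (determine_cluster_status node_statuses instance_statuses current_status)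

-- ===== LEMMAS AND PROOFS =====

-- The fold's three flags equal: nonemptiness, any error/failed, all running.
theorem pv_fold_char (l : List String) (init : Bool × Bool × Bool) :
    l.foldl
      (fun (acc : Bool × Bool × Bool) s =>
        (true,
         (if s == "error" || s == "failed" then true else acc.2.1),
         (if s != "running" then false else acc.2.2)))
      init
    = ((init.1 || !l.isEmpty),
       (init.2.1 || l.any (fun s => s == "error" || s == "failed")),
       (init.2.2 && l.all (fun s => s == "running"))) := by
  induction l generalizing init with
  | nil => simp
  | cons h t ih =>
      obtain ⟨a, b, c⟩ := init
      simp only [List.foldl_cons, ih, List.any_cons, List.all_cons, List.isEmpty_cons]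
      cases hb : (h == "error" || h == "failed") <;> cases hr : (h == "running") <;>
        cases b <;> cases c <;> simp_all [Bool.or_comm]

theorem determine_cluster_status_eq (ns is : List String) (c : String) :
    determine_cluster_status ns is c = determine_cluster_status_alt ns is c := by
  unfold determine_cluster_status determine_cluster_status_alt
  rw [pv_fold_char]
  simp only [List.any_append, List.all_append, Bool.false_or, Bool.true_and,
    List.contains_eq_any_beq]
  have hemp : ((ns ++ is).isEmpty = true) ↔ (ns = [] ∧ is = []) := by
    simp [List.isEmpty_iff]
  by_cases he : ns = [] ∧ is = []
  · simp [he.1, he.2]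
  · have h1 : (ns ++ is).isEmpty = false := by
      cases h : (ns ++ is).isEmpty
      · rfl
      · exact absurd (hemp.mp h) he
    by_cases h2 : (((ns.any fun s => s == "error" || s == "failed") ||
        is.any fun s => s == "error" || s == "failed") = true)
    · have hm : (("error" ∈ ns ∨ "error" ∈ is) ∨ "failed" ∈ ns) ∨ "failed" ∈ is := by
        simp only [List.any_eq_true, Bool.or_eq_true, beq_iff_eq] at h2
        aesop
      simp [he, h1, h2, hm]
    · have h4 := Bool.eq_false_iff.mpr h2
      have hnm : ¬ ((("error" ∈ ns ∨ "error" ∈ is) ∨ "failed" ∈ ns) ∨ "failed" ∈ is) := by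
        intro hm
        apply h2
        simp only [List.any_eq_true, Bool.or_eq_true, beq_iff_eq]
        rcases hm with ((h | h) | h) | h
        · exact Or.inl ⟨_, h, Or.inl rfl⟩
        · exact Or.inr ⟨_, h, Or.inl rfl⟩
        · exact Or.inl ⟨_, h, Or.inr rfl⟩
        · exact Or.inr ⟨_, h, Or.inr rfl⟩
      by_cases h5 : (ns.all fun s => s == "running") = true ∧
          (is.all fun s => s == "running") = true
      · simp [he, h1, h4, hnm, h5.1, h5.2]
      · have h6 : ((ns.all fun s => s == "running") &&
            (is.all fun s => s == "running")) = false := by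
          cases hx : ns.all fun s => s == "running" <;>
            cases hy : is.all fun s => s == "running" <;> simp_all
        have h7 : ¬ ((∀ x ∈ ns, x = "running") ∧ ∀ x ∈ is, x = "running") := by
          simp only [List.all_eq_true, beq_iff_eq] at h5
          exact h5
        simp [he, h1, h4, hnm, h6, h7]

-- ===== VERDICT (by name: the statement is the Claim_ definition above) =====
theorem determine_cluster_status_spec : Claim_equal_determine_cluster_status := by
  intro ns is c _
  exact determine_cluster_status_eq ns is c
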